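-- pv_equiv track=rewrite | github.com/jiayiiiZeng/RGnet | 00.script/main_random_1110_case.py | homo
-- ===== SOURCE A (Python) =====
-- def homo(list1):
-- 	num=0
-- 	for i in list1:
-- 		if (i%2==0):
-- 			if (i-1) in list1:
-- 				num+=1
-- 			else:
-- 				continue
-- 		if(i%2==1):
-- 			if(i+1) in list1:
-- 				num+=1
-- 			else:
-- 				continue
-- 	return(num)
-- ===== SOURCE B (Python) =====
-- def homo(list1):
--     cnt = {}
--     for v in list1:
--         cnt[v] = cnt.get(v, 0) + 1
--     total = 0
--     for v, c in cnt.items():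
--         partner = v - 1 if v % 2 == 0 else v + 1
--         if partner in cnt:
--             total += c
--     return total
-- ===== Notes on version B (the rewrite author's own statement) =====
-- stated objective: faster
-- what changed: Build a frequency dict once and iterate its distinct keys, adding each key's count when its even/odd partner is a key, instead of one linear membership scan per element.
import Mathlib
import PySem

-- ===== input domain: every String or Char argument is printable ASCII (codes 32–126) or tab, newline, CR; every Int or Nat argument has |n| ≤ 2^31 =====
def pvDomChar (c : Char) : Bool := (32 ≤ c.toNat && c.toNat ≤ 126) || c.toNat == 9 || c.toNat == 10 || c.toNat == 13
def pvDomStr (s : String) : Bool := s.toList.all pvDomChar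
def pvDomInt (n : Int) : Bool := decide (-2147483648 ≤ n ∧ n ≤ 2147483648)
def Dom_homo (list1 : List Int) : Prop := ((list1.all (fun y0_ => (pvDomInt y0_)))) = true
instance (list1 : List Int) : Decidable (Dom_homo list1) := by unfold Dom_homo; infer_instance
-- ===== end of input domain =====

-- B replaces A's per-element linear membership scans by a frequency dict built once,
-- summing counts over distinct keys whose even/odd partner is a key (faster).


-- ===== PORT A =====
def homo (list1 : List Int) : Int :=
  list1.foldl (fun num i =>
    -- 'if i%2==0: …' then 'if i%2==1: …'; a 'continue' only skips the second test,
    -- which could not fire anyway, so the sequential tests are this if/else chain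
    if PySem.Int.mod i 2 = 0 then
      (if list1.contains (i - 1) then num + 1 else num)
    else if PySem.Int.mod i 2 = 1 then
      (if list1.contains (i + 1) then num + 1 else num)
    else num) 0

-- ===== PORT B =====
def homo_alt (list1 : List Int) : Int :=
  let cnt : PySem.Dict Int Int :=
    list1.foldl (fun d v => d.insert v (d.getD v 0 + 1)) PySem.Dict.empty
  cnt.items.foldl (fun total p =>
    let partner := if PySem.Int.mod p.1 2 = 0 then p.1 - 1 else p.1 + 1
    if cnt.contains partner then total + p.2 else total) 0

-- ===== PRECONDITION & SPEC =====
def Spec_homo (list1 : List Int) (out : Int) : Prop := out = homo_alt list1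
instance (list1 : List Int) (out : Int) : Decidable (Spec_homo list1 out) := by unfold Spec_homo; infer_instance

-- ===== CLAIM (what is proved, stated in full; the proofs are below) =====
def Claim_equal_homo : Prop := ∀ (list1 : List Int), Dom_homo list1 → Spec_homo list1 (homo list1)

-- ===== LEMMAS AND PROOFS =====

-- per-element contribution, shared by both sides
def homoG (list1 : List Int) (i : Int) : Int :=
  if list1.contains (if PySem.Int.mod i 2 = 0 then i - 1 else i + 1) then 1 else 0

lemma mod2_cases (i : Int) : PySem.Int.mod i 2 = 0 ∨ PySem.Int.mod i 2 = 1 := by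
  simp only [PySem.Int.mod, Int.fmod_eq_emod_of_nonneg _ (by norm_num : (0:Int) ≤ 2)]
  omega

lemma homo_eq_sum (list1 : List Int) :
    homo list1 = (list1.map (homoG list1)).sum := by
  unfold homo
  rw [show (fun (num : Int) (i : Int) =>
      if PySem.Int.mod i 2 = 0 then
        (if list1.contains (i - 1) then num + 1 else num)
      else if PySem.Int.mod i 2 = 1 then
        (if list1.contains (i + 1) then num + 1 else num)
      else num) = (fun num i => num + homoG list1 i) from ?_]
  · rw [PySem.List.foldl_add]; ring
  · funext num i
    unfold homoG
    rcases mod2_cases i with h | h <;> simp only [h] <;> split_ifs <;> omega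

lemma homo_alt_eq_sum (list1 : List Int) :
    homo_alt list1 =
      ((PySem.Set.ofList list1).map
        (fun k => (list1.count k : Int) * homoG list1 k)).sum := by
  unfold homo_alt
  show ((PySem.Dict.counter list1).items.foldl (fun total p =>
      if (PySem.Dict.counter list1).contains
          (if PySem.Int.mod p.1 2 = 0 then p.1 - 1 else p.1 + 1) then total + p.2
      else total) 0) = _
  rw [PySem.Dict.items_counter]
  rw [show (fun (total : Int) (p : Int × Int) =>
      if (PySem.Dict.counter list1).contains
          (if PySem.Int.mod p.1 2 = 0 then p.1 - 1 else p.1 + 1) then total + p.2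
      else total)
    = (fun total p => total +
        (if list1.contains (if PySem.Int.mod p.1 2 = 0 then p.1 - 1 else p.1 + 1)
         then p.2 else 0)) from ?_]
  · rw [PySem.List.foldl_add, List.map_map, zero_add]
    apply congrArg List.sum
    refine List.map_congr_left ?_
    intro k _
    simp only [Function.comp_apply, homoG]
    split_ifs <;> ring
  · funext total p
    rw [PySem.Dict.contains_counter]
    split_ifs <;> omega

lemma sum_over_dedup (list1 : List Int) (g : Int → Int) :
    (list1.map g).sum
      = ((PySem.Set.ofList list1).map (fun k => (list1.count k : Int) * g k)).sum := by
  rw [Finset.sum_list_map_count]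
  have hnd : (PySem.Set.ofList list1 : List Int).Nodup := by
    rw [← PySem.List.dedup_eq_ofList]; exact PySem.List.nodup_dedup list1
  have hfs : (PySem.Set.ofList list1 : List Int).toFinset = list1.toFinset := by
    ext x
    simp [← PySem.List.dedup_eq_ofList, PySem.List.mem_dedup]
  rw [← List.sum_toFinset _ hnd, hfs]
  refine Finset.sum_congr rfl ?_
  intro m _
  simp

-- ===== VERDICT (by name: the statement is the Claim_ definition above) =====
theorem homo_spec : Claim_equal_homo := by
  intro list1 _
  unfold Spec_homo
  rw [homo_eq_sum, homo_alt_eq_sum, sum_over_dedup]
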